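-- pv_equiv track=rewrite | github.com/dohun31/algorithm | 2021/week_01/힙.py | solution
-- ===== SOURCE A (Python) =====
-- import heapq
--
-- def solution(scoville, K):
--     heapq.heapify(scoville)
--     result = 0
--     while scoville[0] <= K:
--         if len(scoville) > 1:
--             heapq.heappush(scoville, heapq.heappop(scoville) + heapq.heappop(scoville) * 2)
--             result += 1
--         else:
--             return -1
--     return result
-- ===== SOURCE B (Python) =====
-- def solution(scoville, K):
--     s = sorted(scoville)
--     result = 0
--     while s[0] <= K:
--         if len(s) == 1:
--             return -1
--         a = s[0]
--         b = s[1]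
--         rest = s[2:]
--         x = a + 2 * b
--         i = 0
--         while i < len(rest) and rest[i] < x:
--             i += 1
--         rest.insert(i, x)
--         s = rest
--         result += 1
--     return result
-- ===== Notes on version B (the rewrite author's own statement) =====
-- stated objective: alternative
-- what changed: Replaces the binary heap (heapq) with a sorted list maintained by linear insertion: sort once, then repeatedly take the two leading (smallest) elements and insert their mix back in order; A mutates scoville into a heap while B leaves it untouched, so equivalence is about the return value only.
import Mathlib
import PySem

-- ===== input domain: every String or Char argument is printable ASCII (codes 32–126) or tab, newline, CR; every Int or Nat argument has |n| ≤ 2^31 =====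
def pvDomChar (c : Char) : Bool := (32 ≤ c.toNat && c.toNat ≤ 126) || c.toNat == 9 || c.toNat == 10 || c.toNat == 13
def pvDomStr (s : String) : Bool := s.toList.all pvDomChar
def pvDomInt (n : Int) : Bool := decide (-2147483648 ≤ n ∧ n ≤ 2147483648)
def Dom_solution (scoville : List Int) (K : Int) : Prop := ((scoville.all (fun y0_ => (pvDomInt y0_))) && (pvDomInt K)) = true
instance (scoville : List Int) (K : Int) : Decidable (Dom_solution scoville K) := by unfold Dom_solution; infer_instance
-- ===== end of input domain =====

-- B replaces A's binary heap (heapq) with a sorted list maintained by linear insertion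
-- (alternative data structure, same outputs); A mutates `scoville` into a heap in place while
-- B does not, so the equivalence proved here is about the RETURN value only.

-- ===== PORT A =====
-- heapq's heap is ported as a min-heap datatype with push / pop-min / heapify operations
-- (the library calls of A, rendered as the corresponding Lean heap functions).
inductive SkewHeap : Type
  | nil : SkewHeap
  | node : Int → SkewHeap → SkewHeap → SkewHeap

def SkewHeap.size : SkewHeap → Nat
  | .nil => 0
  | .node _ l r => l.size + r.size + 1

-- merge, written with a structural fuel bound (fuel = total size suffices; the 0 arm is never hit)
def SkewHeap.mergeF : Nat → SkewHeap → SkewHeap → SkewHeap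
  | 0, _, b => b
  | _+1, .nil, b => b
  | _+1, a, .nil => a
  | f+1, .node x al ar, .node y bl br =>
    if x ≤ y then .node x (SkewHeap.mergeF f ar (.node y bl br)) al
    else .node y (SkewHeap.mergeF f br (.node x al ar)) bl

def SkewHeap.merge (a b : SkewHeap) : SkewHeap :=
  SkewHeap.mergeF (a.size + b.size) a b

def SkewHeap.push (x : Int) (h : SkewHeap) : SkewHeap :=
  SkewHeap.merge (.node x .nil .nil) h

def SkewHeap.heapify (l : List Int) : SkewHeap :=
  l.foldl (fun h v => SkewHeap.push v h) .nil

-- A's while loop; fuel = len(scoville) bounds the iterations (each mix shrinks the heap by one).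
def loopA (K : Int) : Nat → SkewHeap → Int → Int
  | _, .nil, res => res        -- unreachable under Pre_: Python raises IndexError on scoville[0]
  | 0, _, res => res           -- fuel bound, never reached (at most n-1 iterations)
  | fuel+1, .node v l r, res =>
    if v ≤ K then
      match SkewHeap.merge l r with
      | .nil => -1             -- len(scoville) == 1
      | .node v2 l2 r2 =>      -- heappop twice, heappush the mix
        loopA K fuel (SkewHeap.push (v + v2 * 2) (SkewHeap.merge l2 r2)) (res + 1)
    else res

def solution (scoville : List Int) (K : Int) : Int :=
  loopA K scoville.length (SkewHeap.heapify scoville) 0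

-- ===== PORT B =====
-- Source B's hand-written insertion scan: insert x before the first element not < x.
def insertSorted (x : Int) : List Int → List Int
  | [] => [x]
  | b :: t => if b < x then b :: insertSorted x t else x :: b :: t

def loopB (K : Int) : Nat → List Int → Int → Int
  | _, [], res => res          -- unreachable under Pre_: s[0] raises
  | 0, _, res => res           -- fuel bound, never reached
  | fuel+1, a :: t, res =>
    if a ≤ K then
      match t with
      | [] => -1               -- len(s) == 1
      | b :: t2 => loopB K fuel (insertSorted (a + 2 * b) t2) (res + 1)
    else res

def solution_alt (scoville : List Int) (K : Int) : Int :=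
  loopB K scoville.length (PySem.List.sorted scoville (fun x => x) false) 0

-- ===== PRECONDITION & SPEC =====
-- Pre_ excludes only the empty list, on which A (and B) raise IndexError at scoville[0].
def Pre_solution (scoville : List Int) (K : Int) : Prop := scoville ≠ []
instance (scoville : List Int) (K : Int) : Decidable (Pre_solution scoville K) := by unfold Pre_solution; infer_instance
def pvWitness_solution : List Int × Int := ([1, 2, 3, 9, 10, 12], 7)

def Spec_solution (scoville : List Int) (K : Int) (out : Int) : Prop := out = solution_alt scoville K
instance (scoville : List Int) (K : Int) (out : Int) : Decidable (Spec_solution scoville K out) := by unfold Spec_solution; infer_instance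

-- ===== CLAIM (what is proved, stated in full; the proofs are below) =====
def Claim_equal_solution : Prop := ∀ (scoville : List Int) (K : Int), Dom_solution scoville K → Pre_solution scoville K → Spec_solution scoville K (solution scoville K)

-- ===== LEMMAS AND PROOFS =====

def SkewHeap.toList : SkewHeap → List Int
  | .nil => []
  | .node v l r => v :: (l.toList ++ r.toList)

def SkewHeap.IsHeap : SkewHeap → Prop
  | .nil => True
  | .node v l r => (∀ x ∈ l.toList ++ r.toList, v ≤ x) ∧ l.IsHeap ∧ r.IsHeap

lemma size_eq_zero_iff (a : SkewHeap) : a.size = 0 ↔ a = .nil := by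
  cases a <;> simp [SkewHeap.size]

lemma mergeF_toList_perm (fuel : Nat) (a b : SkewHeap) (hf : a.size + b.size ≤ fuel) :
    (SkewHeap.mergeF fuel a b).toList.Perm (a.toList ++ b.toList) := by
  induction fuel generalizing a b with
  | zero =>
    have ha : a = .nil := (size_eq_zero_iff a).mp (by omega)
    subst ha
    simp [SkewHeap.mergeF, SkewHeap.toList]
  | succ f ih =>
    cases a with
    | nil => simp [SkewHeap.mergeF, SkewHeap.toList]
    | node x al ar =>
      cases b with
      | nil => simp [SkewHeap.mergeF, SkewHeap.toList]
      | node y bl br =>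
        simp only [SkewHeap.mergeF]
        simp only [SkewHeap.size] at hf
        split_ifs with hxy
        · simp only [SkewHeap.toList]
          refine List.Perm.cons _ (((ih ar (.node y bl br) (by simp [SkewHeap.size]; omega)).append_right al.toList).trans ?_)
          rw [List.perm_iff_count]
          intro z
          simp [SkewHeap.toList, List.count_append, List.count_cons]
          omega
        · simp only [SkewHeap.toList]
          refine (((ih br (.node x al ar) (by simp [SkewHeap.size]; omega)).append_right bl.toList).cons y).trans ?_
          rw [List.perm_iff_count]
          intro z
          simp [SkewHeap.toList, List.count_append, List.count_cons]
          omega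

lemma merge_toList_perm (a b : SkewHeap) :
    (SkewHeap.merge a b).toList.Perm (a.toList ++ b.toList) :=
  mergeF_toList_perm _ a b (le_refl _)

lemma root_le_toList (v : Int) (l r : SkewHeap) (h : (SkewHeap.node v l r).IsHeap) :
    ∀ x ∈ (SkewHeap.node v l r).toList, v ≤ x := by
  intro x hx
  simp only [SkewHeap.toList, List.mem_cons] at hx
  rcases hx with rfl | hx
  · exact le_refl _
  · exact h.1 x hx

lemma mergeF_isHeap (fuel : Nat) (a b : SkewHeap) (hf : a.size + b.size ≤ fuel)
    (ha : a.IsHeap) (hb : b.IsHeap) : (SkewHeap.mergeF fuel a b).IsHeap := by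
  induction fuel generalizing a b with
  | zero => simpa [SkewHeap.mergeF] using hb
  | succ f ih =>
    cases a with
    | nil => simpa [SkewHeap.mergeF] using hb
    | node x al ar =>
      cases b with
      | nil => simpa [SkewHeap.mergeF] using ha
      | node y bl br =>
        simp only [SkewHeap.mergeF]
        simp only [SkewHeap.size] at hf
        split_ifs with hxy
        · refine ⟨?_, ih ar (.node y bl br) (by simp [SkewHeap.size]; omega) ha.2.2 hb, ha.2.1⟩
          intro z hz
          rcases List.mem_append.mp hz with hz | hz
          · rcases List.mem_append.mp ((mergeF_toList_perm f ar (.node y bl br) (by simp [SkewHeap.size]; omega)).mem_iff.mp hz) with h' | h'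
            · exact ha.1 z (List.mem_append.mpr (Or.inr h'))
            · exact le_trans hxy (root_le_toList y bl br hb z h')
          · exact ha.1 z (List.mem_append.mpr (Or.inl hz))
        · have hyx : y ≤ x := by omega
          refine ⟨?_, ih br (.node x al ar) (by simp [SkewHeap.size]; omega) hb.2.2 ha, hb.2.1⟩
          intro z hz
          rcases List.mem_append.mp hz with hz | hz
          · rcases List.mem_append.mp ((mergeF_toList_perm f br (.node x al ar) (by simp [SkewHeap.size]; omega)).mem_iff.mp hz) with h' | h'
            · exact hb.1 z (List.mem_append.mpr (Or.inr h'))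
            · exact le_trans hyx (root_le_toList x al ar ha z h')
          · exact hb.1 z (List.mem_append.mpr (Or.inl hz))

lemma merge_isHeap (a b : SkewHeap) (ha : a.IsHeap) (hb : b.IsHeap) :
    (SkewHeap.merge a b).IsHeap :=
  mergeF_isHeap _ a b (le_refl _) ha hb

lemma push_isHeap (x : Int) (h : SkewHeap) (hh : h.IsHeap) : (SkewHeap.push x h).IsHeap := by
  refine merge_isHeap _ _ ?_ hh
  exact ⟨by simp [SkewHeap.toList], trivial, trivial⟩

lemma toList_push_perm (x : Int) (h : SkewHeap) :
    (SkewHeap.push x h).toList.Perm (x :: h.toList) := by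
  have := merge_toList_perm (.node x .nil .nil) h
  simpa [SkewHeap.toList] using this

lemma heapify_isHeap_perm (l : List Int) :
    (SkewHeap.heapify l).IsHeap ∧ (SkewHeap.heapify l).toList.Perm l := by
  unfold SkewHeap.heapify
  induction l using List.reverseRecOn with
  | nil => exact ⟨trivial, List.Perm.refl _⟩
  | append_singleton xs x ih =>
    rw [List.foldl_append]
    refine ⟨push_isHeap _ _ ih.1, ?_⟩
    refine ((toList_push_perm _ _).trans (ih.2.cons x)).trans ?_
    rw [List.perm_iff_count]
    intro z
    simp [List.count_append, List.count_cons]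

lemma mem_insertSorted (x y : Int) (t : List Int) :
    y ∈ insertSorted x t ↔ y = x ∨ y ∈ t := by
  induction t with
  | nil => simp [insertSorted]
  | cons b t ih =>
    simp only [insertSorted]
    split_ifs with hb
    · simp only [List.mem_cons, ih]; try tauto
    · simp only [List.mem_cons]; try tauto

lemma insertSorted_perm (x : Int) (t : List Int) : (insertSorted x t).Perm (x :: t) := by
  induction t with
  | nil => simp [insertSorted]
  | cons b t ih =>
    simp only [insertSorted]
    split_ifs with hb
    · exact (ih.cons b).trans (List.Perm.swap x b t)
    · exact List.Perm.refl _

lemma insertSorted_pairwise (x : Int) (t : List Int) (ht : t.Pairwise (· ≤ ·)) :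
    (insertSorted x t).Pairwise (· ≤ ·) := by
  induction t with
  | nil => simp [insertSorted]
  | cons b t ih =>
    simp only [insertSorted]
    rw [List.pairwise_cons] at ht
    split_ifs with hb
    · rw [List.pairwise_cons]
      refine ⟨?_, ih ht.2⟩
      intro y hy
      rcases (mem_insertSorted x y t).mp hy with rfl | hy
      · exact le_of_lt hb
      · exact ht.1 y hy
    · rw [List.pairwise_cons]
      refine ⟨?_, List.pairwise_cons.mpr ht⟩
      intro y hy
      rcases List.mem_cons.mp hy with rfl | hy
      · omega
      · exact le_trans (by omega) (ht.1 y hy)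

-- root of a heap = head of any sorted list with the same elements
lemma root_eq_head (v : Int) (l r : SkewHeap) (a : Int) (t : List Int)
    (hh : (SkewHeap.node v l r).IsHeap)
    (hperm : (SkewHeap.node v l r).toList.Perm (a :: t))
    (hsort : (a :: t).Pairwise (· ≤ ·)) : v = a := by
  have hva : v ≤ a := by
    refine root_le_toList v l r hh a ?_
    exact hperm.mem_iff.mpr (List.mem_cons_self)
  have hav : a ≤ v := by
    have hv : v ∈ a :: t := hperm.mem_iff.mp (by simp [SkewHeap.toList])
    rcases List.mem_cons.mp hv with rfl | hv
    · exact le_refl _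
    · exact (List.pairwise_cons.mp hsort).1 v hv
  omega

lemma loop_eq (K : Int) (fuel : Nat) (h : SkewHeap) (s : List Int) (res : Int)
    (hh : h.IsHeap) (hperm : h.toList.Perm s) (hsort : s.Pairwise (· ≤ ·)) :
    loopA K fuel h res = loopB K fuel s res := by
  induction fuel generalizing h s res with
  | zero =>
    cases h <;> cases s <;> simp [loopA, loopB]
  | succ fuel ih =>
    cases h with
    | nil =>
      have hs : s = [] := by simpa [SkewHeap.toList] using hperm.symm.eq_nil
      subst hs
      simp [loopA, loopB]
    | node v l r =>
      cases s with
      | nil =>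
        have := hperm.eq_nil
        simp [SkewHeap.toList] at this
      | cons a t =>
        have hva : v = a := root_eq_head v l r a t hh hperm hsort
        subst hva
        simp only [loopA, loopB]
        by_cases hK : v ≤ K
        · rw [if_pos hK, if_pos hK]
          have htail : (l.toList ++ r.toList).Perm t := by
            have h0 := hperm
            simp only [SkewHeap.toList] at h0
            exact (List.perm_cons v).mp h0
          have hmergeperm : (SkewHeap.merge l r).toList.Perm t :=
            (merge_toList_perm l r).trans htail
          have hmergeheap : (SkewHeap.merge l r).IsHeap := merge_isHeap l r hh.2.1 hh.2.2
          cases hm : SkewHeap.merge l r with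
          | nil =>
            have ht : t = [] := by
              have h1 := hmergeperm
              rw [hm] at h1
              simpa [SkewHeap.toList] using h1.symm.eq_nil
            subst ht
            rfl
          | node v2 l2 r2 =>
            rw [hm] at hmergeperm hmergeheap
            cases t with
            | nil =>
              have := hmergeperm.eq_nil
              simp [SkewHeap.toList] at this
            | cons b t2 =>
              have htsort : (b :: t2).Pairwise (· ≤ ·) := (List.pairwise_cons.mp hsort).2
              have hv2b : v2 = b := root_eq_head v2 l2 r2 b t2 hmergeheap hmergeperm htsort
              subst hv2b
              show loopA K fuel (SkewHeap.push (v + v2 * 2) (SkewHeap.merge l2 r2)) (res + 1)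
                  = loopB K fuel (insertSorted (v + 2 * v2) t2) (res + 1)
              have ht2 : (l2.toList ++ r2.toList).Perm t2 := by
                have h2 := hmergeperm
                simp only [SkewHeap.toList] at h2
                exact (List.perm_cons v2).mp h2
              have hval : v + v2 * 2 = v + 2 * v2 := by ring
              rw [hval]
              refine ih _ _ _ ?_ ?_ ?_
              · exact push_isHeap _ _ (merge_isHeap l2 r2 hmergeheap.2.1 hmergeheap.2.2)
              · refine (toList_push_perm _ _).trans ?_
                refine (((merge_toList_perm l2 r2).trans ht2).cons _).trans ?_
                exact (insertSorted_perm _ _).symm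
              · exact insertSorted_pairwise _ _ (List.pairwise_cons.mp htsort).2
        · rw [if_neg hK, if_neg hK]

-- ===== VERDICT (by name: the statement is the Claim_ definition above) =====
theorem solution_spec : Claim_equal_solution := by
  intro scoville K _ _
  unfold Spec_solution solution solution_alt
  obtain ⟨hheap, hperm⟩ := heapify_isHeap_perm scoville
  refine loop_eq K scoville.length _ _ 0 hheap ?_ ?_
  · exact hperm.trans (PySem.List.sorted_perm scoville (fun x => x) false).symm
  · simpa using PySem.List.sorted_pairwise scoville (fun x => x)
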